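-- pv_equiv track=rewrite | github.com/kroducek/Arion | src/core/liar_slots.py | _can_execute
-- ===== SOURCE A (Python) =====
-- EXECUTE_THRESHOLD = 5
--
-- def _can_execute(game: dict, uid: str) -> bool:
--     p = game["players"].get(uid)
--     if not p or not p["alive"] or p["points"] < EXECUTE_THRESHOLD:
--         return False
--     alive_pts = [(u, pd["points"]) for u, pd in game["players"].items() if pd["alive"]]
--     max_pts = max(pts for _, pts in alive_pts)
--     top = [u for u, pts in alive_pts if pts == max_pts]
--     return len(top) == 1 and top[0] == uid
-- ===== SOURCE B (Python) =====
-- EXECUTE_THRESHOLD = 5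
--
-- def _can_execute(game: dict, uid: str) -> bool:
--     me = game["players"].get(uid)
--     if not me or not me["alive"] or me["points"] < EXECUTE_THRESHOLD:
--         return False
--     for u, pd in game["players"].items():
--         if u != uid and pd["alive"] and pd["points"] >= me["points"]:
--             return False
--     return True
-- ===== Notes on version B (the rewrite author's own statement) =====
-- stated objective: simpler
-- what changed: Replaces A's materialized alive-points list, max() pass and tie-list with one explicit early-returning loop over the players that returns False at the first alive rival whose points reach uid's points.
import Mathlib
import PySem

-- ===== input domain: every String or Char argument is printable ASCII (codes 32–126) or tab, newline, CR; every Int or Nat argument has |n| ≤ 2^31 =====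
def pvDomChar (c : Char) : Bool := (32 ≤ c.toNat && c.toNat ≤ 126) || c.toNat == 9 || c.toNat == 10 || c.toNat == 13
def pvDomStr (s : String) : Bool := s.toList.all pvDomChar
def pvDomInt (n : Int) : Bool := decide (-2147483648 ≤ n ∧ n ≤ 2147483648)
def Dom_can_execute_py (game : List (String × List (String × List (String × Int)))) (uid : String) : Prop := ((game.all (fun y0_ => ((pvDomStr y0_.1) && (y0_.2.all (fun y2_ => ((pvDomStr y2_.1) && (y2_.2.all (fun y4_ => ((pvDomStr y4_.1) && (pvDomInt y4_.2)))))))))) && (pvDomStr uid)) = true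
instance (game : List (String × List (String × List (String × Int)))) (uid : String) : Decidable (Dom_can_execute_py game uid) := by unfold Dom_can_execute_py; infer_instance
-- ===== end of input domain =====

-- B replaces A's materialized alive-points list / max() pass / tie-list with one explicit
-- early-returning loop over the players that stops at the first alive rival whose points
-- reach uid's points (simpler; same O(n)).

-- ===== PORT A =====
-- A-side helper: game["players"] as a PySem.Dict of PySem.Dicts (none = KeyError)
def pvGamePlayers (game : List (String × List (String × List (String × Int)))) :
    Option (PySem.Dict String (PySem.Dict String Int)) :=
  ((PySem.Dict.ofList game).get? "players").map
    (fun pls => PySem.Dict.ofList (pls.map (fun q => (q.1, PySem.Dict.ofList q.2))))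

def can_execute_py (game : List (String × List (String × List (String × Int)))) (uid : String) : Bool :=
  match pvGamePlayers game with
  | none => false  -- game["players"] raises KeyError: excluded by Pre_
  | some players =>
    match players.get? uid with
    | none => false
    | some p =>
      if p.items.isEmpty || p.getD "alive" 0 == 0 || decide (p.getD "points" 0 < 5) then false
      else
        let alive_pts := (players.items.filter (fun q => q.2.getD "alive" 0 != 0)).map
          (fun q => (q.1, q.2.getD "points" 0))
        let max_pts := (PySem.List.max? (alive_pts.map Prod.snd) id).getD 0  -- nonempty under the guard
        let top := (alive_pts.filter (fun q => q.2 == max_pts)).map Prod.fst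
        top.length == 1 && top.headD "" == uid

-- ===== PORT B =====
-- B-side helper: Source B's for-loop with early `return False` at the first qualifying rival
def pvNoRival (uid : String) (mypts : Int) : List (String × PySem.Dict String Int) → Bool
  | [] => true
  | (u, pd) :: rest =>
      if u ≠ uid ∧ pd.getD "alive" 0 ≠ 0 ∧ mypts ≤ pd.getD "points" 0 then false
      else pvNoRival uid mypts rest

def can_execute_py_alt (game : List (String × List (String × List (String × Int)))) (uid : String) : Bool :=
  match (PySem.Dict.ofList game).get? "players" with
  | none => false  -- game["players"] raises KeyError: excluded by Pre_
  | some pls =>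
    let players := PySem.Dict.ofList (pls.map (fun q => (q.1, PySem.Dict.ofList q.2)))
    match players.get? uid with
    | none => false
    | some me =>
      !me.items.isEmpty && me.getD "alive" 0 != 0 && decide (5 ≤ me.getD "points" 0) &&
        pvNoRival uid (me.getD "points" 0) players.items

-- ===== PRECONDITION & SPEC =====
-- Pre_ = exactly the inputs where A returns (no exception): "players" present, and every
-- player-dict key ("alive", then "points") that A's control flow actually reads is present.
def pvPreB (game : List (String × List (String × List (String × Int)))) (uid : String) : Bool :=
  match pvGamePlayers game with
  | none => false
  | some players =>
    match players.get? uid with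
    | none => true
    | some p =>
      p.items.isEmpty ||
      (p.contains "alive" && (p.getD "alive" 0 == 0 ||
        (p.contains "points" && (decide (p.getD "points" 0 < 5) ||
          players.items.all (fun q => q.2.contains "alive" &&
            (q.2.getD "alive" 0 == 0 || q.2.contains "points"))))))
def Pre_can_execute_py (game : List (String × List (String × List (String × Int)))) (uid : String) : Prop :=
  pvPreB game uid = true
instance (game : List (String × List (String × List (String × Int)))) (uid : String) : Decidable (Pre_can_execute_py game uid) := by unfold Pre_can_execute_py; infer_instance

def pvWitness_can_execute_py : (List (String × List (String × List (String × Int)))) × String :=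
  ([("players", [("a", [("alive", 1), ("points", 5)]), ("b", [("alive", 0)])])], "a")

def Spec_can_execute_py (game : List (String × List (String × List (String × Int)))) (uid : String) (out : Bool) : Prop := out = can_execute_py_alt game uid
instance (game : List (String × List (String × List (String × Int)))) (uid : String) (out : Bool) : Decidable (Spec_can_execute_py game uid out) := by unfold Spec_can_execute_py; infer_instance

-- ===== CLAIM (what is proved, stated in full; the proofs are below) =====
def Claim_equal_can_execute_py : Prop := ∀ (game : List (String × List (String × List (String × Int)))) (uid : String), Dom_can_execute_py game uid → Pre_can_execute_py game uid → Spec_can_execute_py game uid (can_execute_py game uid)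

-- ===== LEMMAS AND PROOFS =====

-- B's early-exit loop computes a pointwise `all` over the items list
lemma pvNoRival_eq_all (uid : String) (P : Int) (L : List (String × PySem.Dict String Int)) :
    pvNoRival uid P L
    = L.all (fun q =>
        !(q.2.getD "alive" 0 != 0 && q.1 != uid) ||
          decide (q.2.getD "points" 0 < P)) := by
  induction L with
  | nil => rfl
  | cons q rest ih =>
    obtain ⟨u, pd⟩ := q
    simp only [pvNoRival, List.all_cons, ← ih]
    by_cases h : u ≠ uid ∧ pd.getD "alive" 0 ≠ 0 ∧ P ≤ pd.getD "points" 0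
    · rw [if_pos h]
      obtain ⟨h1, h2, h3⟩ := h
      have : ¬ pd.getD "points" 0 < P := not_lt.mpr h3
      simp [h1, h2, this]
    · rw [if_neg h]
      by_cases h1 : u = uid
      · simp [h1]
      · by_cases h2 : pd.getD "alive" 0 = 0
        · simp [h2]
        · have h3 : pd.getD "points" 0 < P := by
            by_contra hc
            exact h ⟨h1, h2, not_lt.mp hc⟩
          simp [h3]

-- a Nodup list whose members all equal a, containing a, is [a]
lemma pv_eq_singleton {α : Type} {xs : List α} {a : α} (hnd : xs.Nodup)
    (hmem : a ∈ xs) (hall : ∀ x ∈ xs, x = a) : xs = [a] := by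
  match xs, hnd with
  | [], _ => cases hmem
  | [x], _ => simp [hall x (by simp)]
  | x :: y :: t, hnd =>
    have hx := hall x (by simp)
    have hy := hall y (by simp)
    subst hx
    simp [hy] at hnd

-- the heart: A's max/tie-list test equals the pointwise rival comparison, over the items list
lemma pv_core (L : List (String × PySem.Dict String Int)) (uid : String)
    (p : PySem.Dict String Int)
    (hmem : (uid, p) ∈ L) (hnd : L.Nodup)
    (hkey : ∀ q ∈ L, q.1 = uid → q.2 = p)
    (halive : p.getD "alive" 0 ≠ 0) :
    (let alive_pts := (L.filter (fun q => q.2.getD "alive" 0 != 0)).map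
        (fun q => (q.1, q.2.getD "points" 0));
     let max_pts := (PySem.List.max? (alive_pts.map Prod.snd) id).getD 0;
     let top := (alive_pts.filter (fun q => q.2 == max_pts)).map Prod.fst;
     (top.length == 1 && top.headD "" == uid))
    = L.all (fun q =>
        !(q.2.getD "alive" 0 != 0 && q.1 != uid) ||
          decide (q.2.getD "points" 0 < p.getD "points" 0)) := by
  simp only [List.filter_map, List.map_map, Function.comp_def]
  set F := L.filter (fun q => q.2.getD "alive" 0 != 0) with hF
  set P := p.getD "points" 0 with hP
  have hmemF : (uid, p) ∈ F := List.mem_filter.mpr ⟨hmem, by simpa using halive⟩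
  have hsubL : ∀ q, q ∈ F → q ∈ L := fun q hq => List.mem_of_mem_filter hq
  have haliveF : ∀ q ∈ F, q.2.getD "alive" 0 ≠ 0 := by
    intro q hq
    have := (List.mem_filter.mp hq).2
    simpa using this
  cases hmax : PySem.List.max? (F.map (fun q => q.2.getD "points" 0)) id with
  | none =>
    rw [PySem.List.max?_eq_none_iff, List.map_eq_nil_iff] at hmax
    rw [hmax] at hmemF
    cases hmemF
  | some m =>
    simp only [Option.getD_some]
    have hub : ∀ q ∈ F, q.2.getD "points" 0 ≤ m := by
      intro q hq
      simpa using PySem.List.max?_isMax hmax _ (List.mem_map_of_mem hq)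
    have hPm : P ≤ m := hub _ hmemF
    obtain ⟨q0, hq0F, hq0⟩ : ∃ q0 ∈ F, q0.2.getD "points" 0 = m := by
      obtain ⟨q0, hq0F, hq0⟩ := List.mem_map.mp (PySem.List.max?_mem hmax)
      exact ⟨q0, hq0F, hq0⟩
    set T := F.filter (fun q => q.2.getD "points" 0 == m) with hT
    have hndT : T.Nodup := (hnd.filter _).filter _
    have hLprop : ∀ q ∈ L, q.1 = uid → q = (uid, p) := by
      intro q hq h1
      have := hkey q hq h1
      calc q = (q.1, q.2) := rfl
        _ = (uid, p) := by rw [h1, this]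
    rw [Bool.eq_iff_iff]
    simp only [Bool.and_eq_true, beq_iff_eq, List.length_map, List.all_eq_true,
      Bool.or_eq_true, Bool.not_eq_true', Bool.and_eq_false_iff, bne_eq_false_iff_eq,
      decide_eq_true_eq]
    constructor
    · rintro ⟨hlen, hhead⟩
      obtain ⟨a, ha⟩ := List.length_eq_one_iff.mp hlen
      have haT : a ∈ T := by rw [ha]; simp
      have hauid : a.1 = uid := by
        rw [ha] at hhead
        simpa using hhead
      have haeq : a = (uid, p) := hLprop a (hsubL a (List.mem_of_mem_filter haT)) hauid
      have hPmeq : P = m := by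
        have := (List.mem_filter.mp haT).2
        rw [haeq] at this
        simpa [hP] using this
      intro q hq
      by_cases hcase : q.2.getD "alive" 0 ≠ 0 ∧ q.1 ≠ uid
      · right
        obtain ⟨ha1, ha2⟩ := hcase
        have hqF : q ∈ F := List.mem_filter.mpr ⟨hq, by simpa using ha1⟩
        have hle : q.2.getD "points" 0 ≤ m := hub q hqF
        rcases lt_or_eq_of_le hle with h | h
        · rw [hPmeq]; exact h
        · exfalso
          have hqT : q ∈ T := List.mem_filter.mpr ⟨hqF, by simpa using h⟩
          rw [ha] at hqT
          have : q = a := by simpa using hqT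
          rw [this, hauid] at ha2
          exact ha2 rfl
      · left
        by_cases h1 : q.2.getD "alive" 0 = 0
        · exact Or.inl h1
        · right
          by_contra h2
          exact hcase ⟨h1, h2⟩
    · intro hall
      have hPmeq : P = m := by
        by_cases hc : q0.1 = uid
        · have := hLprop q0 (hsubL q0 hq0F) hc
          rw [this] at hq0
          rw [hP]; exact hq0
        · exfalso
          rcases hall q0 (hsubL q0 hq0F) with h | h
          · rcases h with h | h
            · exact haliveF q0 hq0F h
            · exact hc h
          · rw [hq0] at h
            exact absurd (lt_of_le_of_lt hPm h) (lt_irrefl _)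
      have hTe : T = [(uid, p)] := by
        apply pv_eq_singleton hndT
        · exact List.mem_filter.mpr ⟨hmemF, by simp [← hP, hPmeq]⟩
        · intro x hx
          have hxF : x ∈ F := List.mem_of_mem_filter hx
          have hxm : x.2.getD "points" 0 = m := by simpa using (List.mem_filter.mp hx).2
          by_cases hc : x.1 = uid
          · exact hLprop x (hsubL x hxF) hc
          · exfalso
            rcases hall x (hsubL x hxF) with h | h
            · rcases h with h | h
              · exact haliveF x hxF h
              · exact hc h
            · rw [hxm, hPmeq] at h
              exact absurd h (lt_irrefl _)
      rw [hTe]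
      simp

-- ===== VERDICT (by name: the statement is the Claim_ definition above) =====
theorem can_execute_py_spec : Claim_equal_can_execute_py := by
  intro game uid _ _
  unfold Spec_can_execute_py can_execute_py can_execute_py_alt
  cases hg : (PySem.Dict.ofList game).get? "players" with
  | none => simp [pvGamePlayers, hg]
  | some pls =>
    have hparse : pvGamePlayers game
        = some (PySem.Dict.ofList (pls.map (fun q => (q.1, PySem.Dict.ofList q.2)))) := by
      simp [pvGamePlayers, hg]
    rw [hparse]
    dsimp only
    set players := PySem.Dict.ofList (pls.map (fun q => (q.1, PySem.Dict.ofList q.2))) with hpl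
    cases hp : players.get? uid with
    | none => rfl
    | some p =>
      dsimp only
      by_cases hguard : (p.items.isEmpty || p.getD "alive" 0 == 0 || decide (p.getD "points" 0 < 5)) = true
      · rw [if_pos hguard]
        simp only [Bool.or_eq_true, beq_iff_eq, decide_eq_true_eq] at hguard
        rcases hguard with (h | h) | h
        · simp [h]
        · simp [h]
        · simp [not_le.mpr h]
      · rw [if_neg hguard]
        simp only [Bool.or_eq_true, beq_iff_eq, decide_eq_true_eq, not_or] at hguard
        obtain ⟨⟨hne, halive⟩, hpts⟩ := hguard
        have hnee : (!p.items.isEmpty) = true := by simp [hne]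
        have hali : (p.getD "alive" 0 != 0) = true := by simp [halive]
        have h5 : decide (5 ≤ p.getD "points" 0) = true := by
          simp [le_of_not_gt hpts]
        simp only [hnee, hali, h5, Bool.true_and]
        rw [pvNoRival_eq_all]
        have hkeysnd : players.keys.Nodup := by
          rw [hpl]
          exact PySem.Dict.nodup_keys_ofList _
        have hmem : (uid, p) ∈ players.items :=
          PySem.Dict.mem_items_of_get?_eq_some players hp
        have hnd : players.items.Nodup := by
          have h : players.keys = players.items.map Prod.fst := rfl
          rw [h] at hkeysnd
          exact hkeysnd.of_map
        have hkey : ∀ q ∈ players.items, q.1 = uid → q.2 = p := by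
          intro q hq h1
          have h2 : players.get? q.1 = some q.2 :=
            (PySem.Dict.get?_eq_some_iff_mem_items players q.1 q.2 hkeysnd).mpr hq
          rw [h1, hp] at h2
          exact (Option.some.inj h2).symm
        exact pv_core players.items uid p hmem hnd hkey halive
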